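-- pv_equiv track=rewrite | github.com/danielmichaelni/live-coding-interview-problems | bomberman.py | get_col_kill_scores
-- ===== SOURCE A (Python) =====
-- def get_col_kill_scores(grid):
--     kill_scores = [[0 for j in range(len(grid[0]))] for i in range(len(grid))]
--     for j in range(len(grid[0])):
--         start = 0
--         enemies_killed = 0
--         for i in range(len(grid)):
--             if grid[i][j] == 'E':
--                 enemies_killed += 1
--             elif grid[i][j] == 'W':
--                 for k in range(start, i):
--                     if grid[k][j] == '0':
--                         kill_scores[k][j] = enemies_killed
--                 start = i
--                 enemies_killed = 0
--         for k in range(start, len(grid)):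
--             if grid[k][j] == '0':
--                 kill_scores[k][j] = enemies_killed
--     return kill_scores
-- ===== SOURCE B (Python) =====
-- def get_col_kill_scores(grid):
--     rows, cols = len(grid), len(grid[0])
--     res = [[0] * cols for _ in range(rows)]
--     for j in range(cols):
--         segid = []
--         counts = [0]
--         s = 0
--         for i in range(rows):
--             c = grid[i][j]
--             if c == 'W':
--                 s += 1
--                 counts.append(0)
--             elif c == 'E':
--                 counts[s] += 1
--             segid.append(s)
--         for i in range(rows):
--             if grid[i][j] == '0':
--                 res[i][j] = counts[segid[i]]
--     return res
-- ===== Notes on version B (the rewrite author's own statement) =====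
-- stated objective: alternative
-- what changed: B replaces A's backfill-at-each-wall inner k-loop with a per-column two-pass index-then-assign structure: a first pass builds a segment-id array and a per-segment enemy-count array, then a flat second pass writes counts[segid[i]] into each '0' cell.
import Mathlib
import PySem

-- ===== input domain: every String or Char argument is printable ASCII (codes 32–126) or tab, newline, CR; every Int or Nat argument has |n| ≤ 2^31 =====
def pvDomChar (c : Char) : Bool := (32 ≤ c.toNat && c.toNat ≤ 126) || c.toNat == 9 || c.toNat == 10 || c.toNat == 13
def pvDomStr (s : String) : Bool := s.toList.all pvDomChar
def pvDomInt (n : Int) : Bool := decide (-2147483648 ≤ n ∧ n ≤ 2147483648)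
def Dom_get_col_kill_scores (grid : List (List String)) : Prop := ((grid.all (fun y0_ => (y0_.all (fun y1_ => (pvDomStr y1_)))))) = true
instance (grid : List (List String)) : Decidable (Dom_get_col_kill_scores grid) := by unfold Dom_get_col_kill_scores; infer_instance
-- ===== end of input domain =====

-- B replaces A's backfill-at-each-wall inner loop by a per-column two-pass
-- (build segment ids and per-segment enemy counts, then one flat assignment pass);
-- same O(rows·cols) cost, different decomposition ("alternative").

-- grid[i][j] (indices always in range on Pre_)
def pvCell (grid : List (List String)) (j i : Nat) : String := (grid.getD i []).getD j ""

-- kill_scores[k][j] = v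
def pvWrite (ks : List (List Int)) (k j : Nat) (v : Int) : List (List Int) :=
  ks.modify k (fun row => row.set j v)

-- ===== PORT A =====
def get_col_kill_scores (grid : List (List String)) : List (List Int) :=
  (List.range (grid.headD []).length).foldl
    (fun ks j =>
      let st := (List.range grid.length).foldl
        (fun (s : Nat × Int × List (List Int)) i =>
          if pvCell grid j i == "E" then (s.1, s.2.1 + 1, s.2.2)
          else if pvCell grid j i == "W" then
            (i, 0, (List.range' s.1 (i - s.1)).foldl
              (fun ks k => if pvCell grid j k == "0" then pvWrite ks k j s.2.1 else ks) s.2.2)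
          else s)
        (0, 0, ks)
      (List.range' st.1 (grid.length - st.1)).foldl
        (fun ks k => if pvCell grid j k == "0" then pvWrite ks k j st.2.1 else ks) st.2.2)
    (grid.map (fun _ => (grid.headD []).map (fun _ => (0 : Int))))

-- ===== PORT B =====
def get_col_kill_scores_alt (grid : List (List String)) : List (List Int) :=
  (List.range (grid.headD []).length).foldl
    (fun res j =>
      let p := (List.range grid.length).foldl
        (fun (st : List Nat × List Int × Nat) i =>
          let st' := if pvCell grid j i == "W" then (st.1, st.2.1 ++ [0], st.2.2 + 1)
                     else if pvCell grid j i == "E" then (st.1, st.2.1.modify st.2.2 (· + 1), st.2.2)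
                     else st
          (st'.1 ++ [st'.2.2], st'.2.1, st'.2.2))
        ([], [(0 : Int)], 0)
      (List.range grid.length).foldl
        (fun res i =>
          if pvCell grid j i == "0" then pvWrite res i j (p.2.1.getD (p.1.getD i 0) 0) else res)
        res)
    ((List.range grid.length).map (fun _ => List.replicate (grid.headD []).length (0 : Int)))

-- ===== PRECONDITION & SPEC =====
-- Pre_ excludes exactly the inputs where Python A raises IndexError:
-- the empty grid (grid[0]) and grids with a row shorter than row 0.
def Pre_get_col_kill_scores (grid : List (List String)) : Prop :=
  grid ≠ [] ∧ ∀ row ∈ grid, (grid.headD []).length ≤ row.length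
instance (grid : List (List String)) : Decidable (Pre_get_col_kill_scores grid) := by
  unfold Pre_get_col_kill_scores; infer_instance

def pvWitness_get_col_kill_scores : List (List String) :=
  [["0", "E"], ["W", "0"], ["E", "0"]]

def Spec_get_col_kill_scores (grid : List (List String)) (out : List (List Int)) : Prop := out = get_col_kill_scores_alt grid
instance (grid : List (List String)) (out : List (List Int)) : Decidable (Spec_get_col_kill_scores grid out) := by unfold Spec_get_col_kill_scores; infer_instance

-- ===== CLAIM (what is proved, stated in full; the proofs are below) =====
def Claim_equal_get_col_kill_scores : Prop := ∀ (grid : List (List String)), Dom_get_col_kill_scores grid → Pre_get_col_kill_scores grid → Spec_get_col_kill_scores grid (get_col_kill_scores grid)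

-- ===== LEMMAS AND PROOFS =====

-- number of walls strictly below row i in column f
def wcnt (f : Nat → String) (i : Nat) : Nat :=
  ((List.range i).filter (fun t => f t == "W")).length

-- number of enemies in rows [a, b)
def cntEb (f : Nat → String) (a b : Nat) : Int :=
  (((List.range' a (b - a)).filter (fun t => f t == "E")).length : Int)

-- number of enemies among rows < n whose segment id is u
def cntSegE (f : Nat → String) (n u : Nat) : Int :=
  (((List.range n).filter (fun t => f t == "E" && wcnt f t == u)).length : Int)

-- index of the last wall strictly below i (0 if none)
def lastW (f : Nat → String) : Nat → Nat
  | 0 => 0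
  | (i+1) => if f i == "W" then i else lastW f i

-- write v k into column j of every '0'-row k ∈ l
def colWrite (f : Nat → String) (j : Nat) (v : Nat → Int) (l : List Nat) (ks : List (List Int)) : List (List Int) :=
  l.foldl (fun ks k => if f k == "0" then pvWrite ks k j (v k) else ks) ks

theorem wcnt_succ (f : Nat → String) (i : Nat) :
    wcnt f (i+1) = wcnt f i + (if f i == "W" then 1 else 0) := by
  by_cases h : f i == "W" <;> simp [wcnt, List.range_succ, h]

theorem wcnt_add (f : Nat → String) {a b : Nat} (h : a ≤ b) :
    wcnt f b = wcnt f a + ((List.range' a (b - a)).filter (fun t => f t == "W")).length := by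
  have h2 : List.range' 0 a ++ List.range' a (b - a) = List.range' 0 b := by
    have h3 := List.range'_append (s := 0) (m := a) (n := b - a) (step := 1)
    have h4 : a + (b - a) = b := by omega
    simpa [h4] using h3
  rw [wcnt, wcnt, List.range_eq_range', List.range_eq_range', ← h2, List.filter_append,
    List.length_append]

theorem wcnt_mono (f : Nat → String) {a b : Nat} (h : a ≤ b) : wcnt f a ≤ wcnt f b := by
  rw [wcnt_add f h]; omega

theorem wcnt_const (f : Nat → String) {a b : Nat} (h : a ≤ b)
    (hw : ∀ t, a ≤ t → t < b → (f t == "W") = false) : wcnt f b = wcnt f a := by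
  rw [wcnt_add f h]
  have : (List.range' a (b - a)).filter (fun t => f t == "W") = [] := by
    rw [List.filter_eq_nil_iff]
    intro t ht
    rw [List.mem_range'_1] at ht
    simp [hw t ht.1 (by omega)]
  simp [this]

theorem cntEb_succ (f : Nat → String) {a i : Nat} (h : a ≤ i) :
    cntEb f a (i+1) = cntEb f a i + (if f i == "E" then 1 else 0) := by
  have h2 : List.range' a (i + 1 - a) = List.range' a (i - a) ++ [i] := by
    have h3 := List.range'_append (s := a) (m := i - a) (n := 1) (step := 1)
    have h4 : a + 1 * (i - a) = i := by omega
    have h5 : i + 1 - a = i - a + 1 := by omega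
    rw [h5, ← h3, h4]
    rfl
  rw [cntEb, cntEb, h2, List.filter_append]
  by_cases hE : f i == "E" <;> simp [hE]

theorem cntSegE_succ (f : Nat → String) (i u : Nat) :
    cntSegE f (i+1) u = cntSegE f i u + (if f i == "E" && wcnt f i == u then 1 else 0) := by
  rw [cntSegE, cntSegE, List.range_succ, List.filter_append]
  by_cases hp : (f i == "E" && wcnt f i == u) = true <;> simp [hp]

theorem cntSegE_zero (f : Nat → String) (n u : Nat) (h : ∀ t, t < n → wcnt f t ≠ u) :
    cntSegE f n u = 0 := by
  rw [cntSegE]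
  have : (List.range n).filter (fun t => f t == "E" && wcnt f t == u) = [] := by
    rw [List.filter_eq_nil_iff]
    intro t ht
    rw [List.mem_range] at ht
    simp [h t ht]
  simp [this]

theorem lastW_le_self (f : Nat → String) (i : Nat) : lastW f i ≤ i := by
  induction i with
  | zero => simp [lastW]
  | succ i ih =>
    rw [lastW]
    split <;> omega

theorem lastW_lt (f : Nat → String) {i : Nat} (h : 0 < i) : lastW f i < i := by
  obtain ⟨i, rfl⟩ : ∃ k, i = k + 1 := ⟨i - 1, by omega⟩
  rw [lastW]
  have := lastW_le_self f i
  split <;> omega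

theorem lastW_zero_or_wall (f : Nat → String) (i : Nat) :
    lastW f i = 0 ∨ (f (lastW f i) == "W") = true := by
  induction i with
  | zero => exact Or.inl rfl
  | succ i ih =>
    rw [lastW]
    by_cases hW : (f i == "W") = true
    · simp [hW]
    · rw [if_neg hW]
      exact ih

theorem lastW_nowall (f : Nat → String) (i t : Nat) (h1 : lastW f i < t) (h2 : t < i) :
    (f t == "W") = false := by
  induction i with
  | zero => omega
  | succ i ih =>
    rw [lastW] at h1
    by_cases hW : (f i == "W") = true
    · rw [if_pos hW] at h1; omega
    · rw [if_neg hW] at h1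
      rcases Nat.lt_or_ge t i with h | h
      · exact ih h1 h
      · have : t = i := by omega
        subst this
        simpa using hW

-- every non-wall row k of the open segment [lastW f i, i) has segment id wcnt f (lastW f i + 1)
theorem seg_wcnt (f : Nat → String) {i k : Nat} (h1 : lastW f i ≤ k) (h2 : k < i)
    (hk : (f k == "W") = false) : wcnt f k = wcnt f (lastW f i + 1) := by
  rcases Nat.eq_or_lt_of_le h1 with h | h
  · subst h
    simp [wcnt_succ, hk]
  · exact wcnt_const f (by omega) (fun t ht1 ht2 => lastW_nowall f i t (by omega) (by omega))

-- the crux: for non-wall k in the segment [lastW f i, i) closed at i (a wall row or the bottom),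
-- the global per-segment enemy count equals the enemy count of rows [lastW f i, i)
theorem seg_char (f : Nat → String) {n i k : Nat} (h1 : lastW f i ≤ k) (h2 : k < i) (hin : i ≤ n)
    (hk : (f k == "W") = false) (hclose : i = n ∨ (f i == "W") = true) :
    cntSegE f n (wcnt f k) = cntEb f (lastW f i) i := by
  have hi0 : 0 < i := by omega
  have hLi : lastW f i < i := lastW_lt f hi0
  have hwk : wcnt f k = wcnt f (lastW f i + 1) := seg_wcnt f h1 h2 hk
  have e1 : List.range' 0 (lastW f i) ++ List.range' (lastW f i) (i - lastW f i) = List.range' 0 i := by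
    have h3 := List.range'_append (s := 0) (m := lastW f i) (n := i - lastW f i) (step := 1)
    simpa [show lastW f i + (i - lastW f i) = i by omega] using h3
  have e2 : List.range' 0 i ++ List.range' i (n - i) = List.range' 0 n := by
    have h3 := List.range'_append (s := 0) (m := i) (n := n - i) (step := 1)
    simpa [show i + (n - i) = n by omega] using h3
  have hsplit : (List.range' 0 (lastW f i) ++ List.range' (lastW f i) (i - lastW f i))
      ++ List.range' i (n - i) = List.range' 0 n := by rw [e1, e2]
  have c1 : (List.range' 0 (lastW f i)).filter (fun t => f t == "E" && wcnt f t == wcnt f k) = [] := by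
    rw [List.filter_eq_nil_iff]
    intro t ht hpred
    rw [List.mem_range'_1] at ht
    rcases lastW_zero_or_wall f i with h0 | hw
    · omega
    · have e3 : wcnt f (lastW f i + 1) = wcnt f (lastW f i) + 1 := by simp [wcnt_succ, hw]
      have e4 : wcnt f t ≤ wcnt f (lastW f i) := wcnt_mono f (by omega)
      simp only [Bool.and_eq_true, beq_iff_eq] at hpred
      omega
  have c3 : (List.range' i (n - i)).filter (fun t => f t == "E" && wcnt f t == wcnt f k) = [] := by
    rcases hclose with rfl | hw
    · simp
    · rw [List.filter_eq_nil_iff]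
      intro t ht hpred
      rw [List.mem_range'_1] at ht
      simp only [Bool.and_eq_true, beq_iff_eq] at hpred
      rcases Nat.eq_or_lt_of_le ht.1 with rfl | hti
      · rw [hpred.1] at hw
        simp at hw
      have e3 : wcnt f (i + 1) = wcnt f i + 1 := by simp [wcnt_succ, hw]
      have e4 : wcnt f (i + 1) ≤ wcnt f t := wcnt_mono f (by omega)
      have e5 : wcnt f (lastW f i + 1) ≤ wcnt f i := wcnt_mono f (by omega)
      omega
  have c2 : (List.range' (lastW f i) (i - lastW f i)).filter (fun t => f t == "E" && wcnt f t == wcnt f k)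
      = (List.range' (lastW f i) (i - lastW f i)).filter (fun t => f t == "E") := by
    apply List.filter_congr
    intro t ht
    rw [List.mem_range'_1] at ht
    by_cases hE : (f t == "E") = true
    · have hWt : (f t == "W") = false := by rw [eq_of_beq hE]; decide
      have e3 : wcnt f t = wcnt f k := by
        rw [hwk]; exact seg_wcnt f (by omega) (by omega) hWt
      simp [hE, e3]
    · simp [hE]
  rw [cntSegE, cntEb, List.range_eq_range', ← hsplit, List.filter_append, List.filter_append,
    c1, c2, c3]
  simp

theorem colWrite_append (f : Nat → String) (j : Nat) (v : Nat → Int) (l1 l2 : List Nat)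
    (ks : List (List Int)) : colWrite f j v (l1 ++ l2) ks = colWrite f j v l2 (colWrite f j v l1 ks) := by
  simp [colWrite, List.foldl_append]

theorem colWrite_congr (f : Nat → String) (j : Nat) (v1 v2 : Nat → Int) (l : List Nat)
    (h : ∀ k ∈ l, (f k == "0") = true → v1 k = v2 k) (ks : List (List Int)) :
    colWrite f j v1 l ks = colWrite f j v2 l ks := by
  induction l generalizing ks with
  | nil => rfl
  | cons a l ih =>
    rw [colWrite, List.foldl_cons, colWrite, List.foldl_cons]
    by_cases ha : (f a == "0") = true
    · rw [if_pos ha, if_pos ha, h a (by simp) ha]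
      exact ih (fun k hk => h k (by simp [hk])) _
    · rw [if_neg ha, if_neg ha]
      exact ih (fun k hk => h k (by simp [hk])) _

theorem A_inv (f : Nat → String) (j n : Nat) (ks : List (List Int)) :
    ∀ i, i ≤ n →
    (List.range i).foldl
      (fun (s : Nat × Int × List (List Int)) i =>
        if f i == "E" then (s.1, s.2.1 + 1, s.2.2)
        else if f i == "W" then
          (i, 0, (List.range' s.1 (i - s.1)).foldl
            (fun ks k => if f k == "0" then pvWrite ks k j s.2.1 else ks) s.2.2)
        else s)
      (0, 0, ks)
    = (lastW f i, cntEb f (lastW f i) i,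
       colWrite f j (fun k => cntSegE f n (wcnt f k)) (List.range (lastW f i)) ks) := by
  intro i
  induction i with
  | zero =>
    intro _
    simp [lastW, cntEb, colWrite]
  | succ i ih =>
    intro hin
    rw [List.range_succ, List.foldl_append, ih (by omega)]
    simp only [List.foldl_cons, List.foldl_nil]
    by_cases hE : (f i == "E") = true
    · have hW : (f i == "W") = false := by rw [eq_of_beq hE]; decide
      rw [if_pos hE]
      have hl : lastW f (i+1) = lastW f i := by simp [lastW, hW]
      simp [hl, cntEb_succ f (lastW_le_self f i), hE]
    · by_cases hW : (f i == "W") = true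
      · rw [if_neg (by simp [hE]), if_pos hW]
        have hl : lastW f (i+1) = i := by simp [lastW, hW]
        rw [hl]
        have hLle := lastW_le_self f i
        have hsplit : List.range (lastW f i) ++ List.range' (lastW f i) (i - lastW f i)
            = List.range i := by
          rw [List.range_eq_range', List.range_eq_range']
          have h3 := List.range'_append (s := 0) (m := lastW f i) (n := i - lastW f i) (step := 1)
          simpa [show lastW f i + (i - lastW f i) = i by omega] using h3
        have h2 : cntEb f i (i+1) = 0 := by
          have h3 : i + 1 - i = 1 := by omega
          simp [cntEb, h3, List.range'_one, hE]
        rw [h2]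
        have key : colWrite f j (fun k => cntSegE f n (wcnt f k)) (List.range i) ks
            = colWrite f j (fun _ => cntEb f (lastW f i) i) (List.range' (lastW f i) (i - lastW f i))
                (colWrite f j (fun k => cntSegE f n (wcnt f k)) (List.range (lastW f i)) ks) := by
          rw [← hsplit, colWrite_append]
          exact colWrite_congr _ _ _ _ _ (fun k hk hk0 => by
            rw [List.mem_range'_1] at hk
            exact seg_char f (i := i) (by omega) (by omega) (by omega)
              (by rw [eq_of_beq hk0]; decide) (Or.inr hW)) _
        rw [key]
        rfl
      · rw [if_neg (by simp [hE]), if_neg (by simp [hW])]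
        have hl : lastW f (i+1) = lastW f i := by simp [lastW, hW]
        simp [hl, cntEb_succ f (lastW_le_self f i), hE]

theorem A_col (f : Nat → String) (j n : Nat) (ks : List (List Int)) :
    (let st := (List.range n).foldl
      (fun (s : Nat × Int × List (List Int)) i =>
        if f i == "E" then (s.1, s.2.1 + 1, s.2.2)
        else if f i == "W" then
          (i, 0, (List.range' s.1 (i - s.1)).foldl
            (fun ks k => if f k == "0" then pvWrite ks k j s.2.1 else ks) s.2.2)
        else s)
      (0, 0, ks)
     (List.range' st.1 (n - st.1)).foldl
      (fun ks k => if f k == "0" then pvWrite ks k j st.2.1 else ks) st.2.2)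
    = colWrite f j (fun k => cntSegE f n (wcnt f k)) (List.range n) ks := by
  rw [A_inv f j n ks n (le_refl n)]
  have hLle := lastW_le_self f n
  have hsplit : List.range (lastW f n) ++ List.range' (lastW f n) (n - lastW f n)
      = List.range n := by
    rw [List.range_eq_range', List.range_eq_range']
    have h3 := List.range'_append (s := 0) (m := lastW f n) (n := n - lastW f n) (step := 1)
    simpa [show lastW f n + (n - lastW f n) = n by omega] using h3
  have key : colWrite f j (fun k => cntSegE f n (wcnt f k)) (List.range n) ks
      = colWrite f j (fun _ => cntEb f (lastW f n) n) (List.range' (lastW f n) (n - lastW f n))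
          (colWrite f j (fun k => cntSegE f n (wcnt f k)) (List.range (lastW f n)) ks) := by
    rw [← hsplit, colWrite_append]
    exact colWrite_congr _ _ _ _ _ (fun k hk hk0 => by
      rw [List.mem_range'_1] at hk
      exact seg_char f (i := n) (by omega) (by omega) (by omega)
        (by rw [eq_of_beq hk0]; decide) (Or.inl rfl)) _
  rw [key]
  rfl

theorem modify_append_length {α : Type} (l1 : List α) (a : α) (l2 : List α) (g : α → α)
    (n : Nat) (h : n = l1.length) : (l1 ++ a :: l2).modify n g = l1 ++ g a :: l2 := by
  subst h
  induction l1 with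
  | nil => simp [List.modify]
  | cons x xs ih => simpa [List.modify] using ih

theorem B_pass1 (f : Nat → String) : ∀ i,
    (List.range i).foldl
      (fun (st : List Nat × List Int × Nat) i =>
        let st' := if f i == "W" then (st.1, st.2.1 ++ [0], st.2.2 + 1)
                   else if f i == "E" then (st.1, st.2.1.modify st.2.2 (· + 1), st.2.2)
                   else st
        (st'.1 ++ [st'.2.2], st'.2.1, st'.2.2))
      ([], [(0 : Int)], 0)
    = ((List.range i).map (fun t => wcnt f (t+1)),
       (List.range (wcnt f i + 1)).map (fun u => cntSegE f i u),
       wcnt f i) := by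
  intro i
  induction i with
  | zero =>
    simp [wcnt, cntSegE]
  | succ i ih =>
    rw [List.range_succ, List.foldl_append, ih]
    simp only [List.foldl_cons, List.foldl_nil]
    by_cases hW : (f i == "W") = true
    · have hEi : (f i == "E") = false := by rw [eq_of_beq hW]; decide
      have hw1 : wcnt f (i+1) = wcnt f i + 1 := by simp [wcnt_succ, hW]
      have hz : cntSegE f (i+1) (wcnt f i + 1) = 0 := by
        apply cntSegE_zero
        intro t ht
        have : wcnt f t ≤ wcnt f i := wcnt_mono f (by omega)
        omega
      have hmap : (List.range (wcnt f i + 1)).map (fun u => cntSegE f i u)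
          = (List.range (wcnt f i + 1)).map (fun u => cntSegE f (i+1) u) := by
        apply List.map_congr_left
        intro u _
        simp [cntSegE_succ, hEi]
      simp only [if_pos hW, Prod.mk.injEq]
      refine ⟨?_, ?_, hw1.symm⟩
      · rw [List.map_append]; simp [hw1]
      · rw [hmap, hw1,
          show List.range (wcnt f i + 1 + 1) = List.range (wcnt f i + 1) ++ [wcnt f i + 1] from
            List.range_succ,
          List.map_append]
        simp [hz]
    · by_cases hE : (f i == "E") = true
      · have hw1 : wcnt f (i+1) = wcnt f i := by simp [wcnt_succ, hW]
        have hsp : (List.range (wcnt f i + 1)).map (fun u => cntSegE f i u)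
            = (List.range (wcnt f i)).map (fun u => cntSegE f i u) ++ [cntSegE f i (wcnt f i)] := by
          rw [List.range_succ, List.map_append]; rfl
        have hlen : ((List.range (wcnt f i)).map (fun u => cntSegE f i u)).length = wcnt f i := by
          simp
        have hmap : (List.range (wcnt f i)).map (fun u => cntSegE f i u)
            = (List.range (wcnt f i)).map (fun u => cntSegE f (i+1) u) := by
          apply List.map_congr_left
          intro u hu
          rw [List.mem_range] at hu
          have hne : (wcnt f i == u) = false := by
            rw [beq_eq_false_iff_ne]; omega
          simp [cntSegE_succ, hne]
        have hlast : cntSegE f (i+1) (wcnt f i) = cntSegE f i (wcnt f i) + 1 := by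
          simp [cntSegE_succ, hE]
        simp only [if_neg (by simp [hW] : ¬ (f i == "W") = true), if_pos hE, Prod.mk.injEq]
        refine ⟨?_, ?_, hw1.symm⟩
        · rw [List.map_append]; simp [hw1]
        · rw [hsp, modify_append_length _ _ _ _ _ hlen.symm, hmap, hw1,
            show List.range (wcnt f i + 1) = List.range (wcnt f i) ++ [wcnt f i] from
              List.range_succ,
            List.map_append]
          simp [hlast]
      · have hw1 : wcnt f (i+1) = wcnt f i := by simp [wcnt_succ, hW]
        have hmap : (List.range (wcnt f i + 1)).map (fun u => cntSegE f i u)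
            = (List.range (wcnt f i + 1)).map (fun u => cntSegE f (i+1) u) := by
          apply List.map_congr_left
          intro u _
          simp [cntSegE_succ, hE]
        simp only [if_neg (by simp [hW] : ¬ (f i == "W") = true),
          if_neg (by simp [hE] : ¬ (f i == "E") = true), Prod.mk.injEq]
        refine ⟨?_, ?_, hw1.symm⟩
        · rw [List.map_append]; simp [hw1]
        · rw [hmap, hw1]

theorem B_col (f : Nat → String) (j n : Nat) (ks : List (List Int)) :
    (let p := (List.range n).foldl
      (fun (st : List Nat × List Int × Nat) i =>
        let st' := if f i == "W" then (st.1, st.2.1 ++ [0], st.2.2 + 1)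
                   else if f i == "E" then (st.1, st.2.1.modify st.2.2 (· + 1), st.2.2)
                   else st
        (st'.1 ++ [st'.2.2], st'.2.1, st'.2.2))
      ([], [(0 : Int)], 0)
     (List.range n).foldl
      (fun res i => if f i == "0" then pvWrite res i j (p.2.1.getD (p.1.getD i 0) 0) else res)
      ks)
    = colWrite f j (fun k => cntSegE f n (wcnt f k)) (List.range n) ks := by
  rw [B_pass1 f n]
  refine colWrite_congr f j _ _ (List.range n) (fun k hk hk0 => ?_) ks
  rw [List.mem_range] at hk
  have hWk : (f k == "W") = false := by rw [eq_of_beq hk0]; decide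
  have hseg : ((List.range n).map (fun t => wcnt f (t+1))).getD k 0 = wcnt f k := by
    rw [List.getD_eq_getElem?_getD, List.getElem?_map, List.getElem?_range hk]
    have hfk : f k = "0" := eq_of_beq hk0
    simp [wcnt_succ, hfk]
  have hidx : wcnt f k < wcnt f n + 1 := by
    have := wcnt_mono f (le_of_lt hk)
    omega
  rw [hseg, List.getD_eq_getElem?_getD, List.getElem?_map, List.getElem?_range hidx]
  simp

theorem ports_agree (grid : List (List String)) :
    get_col_kill_scores grid = get_col_kill_scores_alt grid := by
  unfold get_col_kill_scores get_col_kill_scores_alt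
  have hinit : grid.map (fun _ => (grid.headD []).map (fun _ => (0 : Int)))
      = (List.range grid.length).map (fun _ => List.replicate (grid.headD []).length (0 : Int)) := by
    simp
  rw [hinit]
  congr 1
  funext ks j
  exact (A_col (pvCell grid j) j grid.length ks).trans
    (B_col (pvCell grid j) j grid.length ks).symm

-- ===== VERDICT (by name: the statement is the Claim_ definition above) =====
theorem get_col_kill_scores_spec : Claim_equal_get_col_kill_scores := by
  intro grid _ _
  unfold Spec_get_col_kill_scores
  exact ports_agree grid
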